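-- pv_equiv track=rewrite | github.com/Iris-Cheung-HY/longevity-problem | main.py | longest_career
-- ===== SOURCE A (Python) =====
-- def longest_career(albums):
--   # Write your solution here!
--   alb_dict = {}
--   max_year_count = 0
--   max_artist = ""
--
--   # for row in albums:
--   #   if row[0] not in alb_dict:
--   #     alb_dict[row[0]] = [row[2]]
--   #   else:
--   #     alb_dict[row[0]] += [row[2]]
--
--   for row in albums:
--     art = row[0]
--     year = row[2]
--     if art not in alb_dict:
--       alb_dict[art] = [year, year]
--     else:
--       item = alb_dict[art]
--       alb_dict[art] = [min(item[0], year), max(item[1], year)]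
--
--   for key, values in alb_dict.items():
--     diff = values[1] - values[0]
--
--     if diff > max_year_count:
--       max_year_count = diff
--       max_artist = key
--
--   return max_artist, max_year_count
-- ===== SOURCE B (Python) =====
-- def longest_career(albums):
--     artists = list(dict.fromkeys(row[0] for row in albums))
--     if not artists:
--         return "", 0
--
--     def span(artist):
--         years = [row[2] for row in albums if row[0] == artist]
--         return max(years) - min(years)
--
--     best = max(artists, key=span)
--     s = span(best)
--     if s > 0:
--         return best, s
--     return "", 0
-- ===== Notes on version B (the rewrite author's own statement) =====
-- stated objective: alternative
-- what changed: B drops A's running min/max dict entirely: it dedups the artist names in first-seen order, computes each artist's span on demand by a filtered max-min scan, and selects the winner with max(..., key=span) (first maximal = A's strict-> tie-break), keeping the ("",0) sentinel for empty or all-zero-span input.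
import Mathlib
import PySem

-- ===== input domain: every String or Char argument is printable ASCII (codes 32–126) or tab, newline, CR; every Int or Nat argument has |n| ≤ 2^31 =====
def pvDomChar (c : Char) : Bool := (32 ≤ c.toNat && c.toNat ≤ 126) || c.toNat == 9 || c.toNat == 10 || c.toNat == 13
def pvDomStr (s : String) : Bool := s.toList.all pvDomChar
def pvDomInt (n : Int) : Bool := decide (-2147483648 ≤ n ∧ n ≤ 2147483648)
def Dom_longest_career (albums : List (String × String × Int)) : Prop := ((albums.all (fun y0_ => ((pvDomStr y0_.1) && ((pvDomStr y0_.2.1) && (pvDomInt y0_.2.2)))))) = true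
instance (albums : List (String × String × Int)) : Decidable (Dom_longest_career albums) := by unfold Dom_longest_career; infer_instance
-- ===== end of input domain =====

-- B replaces A's running min/max dict by an ordered dedup of artists plus a per-artist
-- filtered max-min scan selected with max(..., key=span): an alternative decomposition, not faster.

-- ===== PORT A =====
def longest_career (albums : List (String × String × Int)) : String × Int :=
  let d : PySem.Dict String (Int × Int) :=
    albums.foldl (fun d row =>
      d.insert row.1 (match d.get? row.1 with
        | none => (row.2.2, row.2.2)
        | some item => (min item.1 row.2.2, max item.2 row.2.2))) PySem.Dict.empty
  d.items.foldl (fun acc kv =>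
      let diff := kv.2.2 - kv.2.1
      if diff > acc.2 then (kv.1, diff) else acc) ("", 0)

-- ===== PORT B =====
-- span(artist): max(years) - min(years); the fallthrough 0 is unreachable in B
-- (B only applies span to artists occurring in albums, so years is nonempty).
def spanB (albums : List (String × String × Int)) (artist : String) : Int :=
  let years := (albums.filter (fun row => row.1 == artist)).map (fun row => row.2.2)
  match PySem.List.max? years (fun y => y), PySem.List.min? years (fun y => y) with
  | some M, some m => M - m
  | _, _ => 0

def longest_career_alt (albums : List (String × String × Int)) : String × Int :=
  let artists := PySem.List.dedup (albums.map (fun row => row.1))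
  if artists = [] then ("", 0)
  else
    match PySem.List.max? artists (spanB albums) with
    | some best => if spanB albums best > 0 then (best, spanB albums best) else ("", 0)
    | none => ("", 0)

-- ===== PRECONDITION & SPEC =====
def Spec_longest_career (albums : List (String × String × Int)) (out : String × Int) : Prop := out = longest_career_alt albums
instance (albums : List (String × String × Int)) (out : String × Int) : Decidable (Spec_longest_career albums out) := by unfold Spec_longest_career; infer_instance

-- ===== CLAIM (what is proved, stated in full; the proofs are below) =====
def Claim_equal_longest_career : Prop := ∀ (albums : List (String × String × Int)), Dom_longest_career albums → Spec_longest_career albums (longest_career albums)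

-- ===== LEMMAS AND PROOFS =====

-- years of one artist, and the (min, max) pair A's dict ends up holding for that artist
def yearsOf (albums : List (String × String × Int)) (a : String) : List Int :=
  (albums.filter (fun row => row.1 == a)).map (fun row => row.2.2)

def vOf (albums : List (String × String × Int)) (a : String) : Int × Int :=
  match yearsOf albums a with
  | [] => (0, 0)
  | y :: t => (t.foldl min y, t.foldl max y)

-- the min/max accumulation step, as an Option-combinator
def comb (o : Option (Int × Int)) (y : Int) : Option (Int × Int) :=
  match o with
  | none => some (y, y)
  | some p => some (min p.1 y, max p.2 y)

-- A's dict-building fold step, named for the lemmas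
def stepD (d : PySem.Dict String (Int × Int)) (row : String × String × Int) : PySem.Dict String (Int × Int) :=
  d.insert row.1 (match d.get? row.1 with
    | none => (row.2.2, row.2.2)
    | some item => (min item.1 row.2.2, max item.2 row.2.2))

lemma foldl_comb_some (ys : List Int) : ∀ (m M : Int),
    ys.foldl comb (some (m, M)) = some (ys.foldl min m, ys.foldl max M) := by
  induction ys with
  | nil => intro m M; rfl
  | cons y t ih => intro m M; simpa [comb] using ih (min m y) (max M y)

lemma yearsOf_cons (row : String × String × Int) (rest : List (String × String × Int)) (a : String) :
    yearsOf (row :: rest) a = if row.1 == a then row.2.2 :: yearsOf rest a else yearsOf rest a := by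
  by_cases h : (row.1 == a) = true <;> simp [yearsOf, h]

lemma get?_fold (albums : List (String × String × Int)) : ∀ (d : PySem.Dict String (Int × Int)) (a : String),
    (albums.foldl stepD d).get? a = (yearsOf albums a).foldl comb (d.get? a) := by
  induction albums with
  | nil => intro d a; rfl
  | cons row rest ih =>
    intro d a
    rw [List.foldl_cons, ih, yearsOf_cons]
    by_cases h : row.1 = a
    · subst h
      have : (stepD d row).get? row.1 = comb (d.get? row.1) row.2.2 := by
        rw [stepD, PySem.Dict.get?_insert_self]
        cases d.get? row.1 <;> rfl
      simp [this]
    · have hb : (row.1 == a) = false := by simpa using h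
      have : (stepD d row).get? a = d.get? a := by
        rw [stepD, PySem.Dict.get?_insert_of_ne]
        exact fun he => h he.symm
      simp [this, hb]

lemma keys_fold (albums : List (String × String × Int)) :
    (albums.foldl stepD PySem.Dict.empty).keys = PySem.List.dedup (albums.map (fun row => row.1)) := by
  have h := PySem.Dict.keys_foldl_insert_key (ν := Int × Int) albums (fun row => row.1)
    (fun d row => match d.get? row.1 with
      | none => (row.2.2, row.2.2)
      | some item => (min item.1 row.2.2, max item.2 row.2.2)) PySem.Dict.empty
  simpa [stepD, PySem.Set.update, PySem.List.dedup, PySem.Set.ofList] using h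

lemma items_of_nodup {κ ν : Type} [BEq κ] [LawfulBEq κ] (l : List (κ × ν)) (v : κ → ν)
    (hnd : (l.map Prod.fst).Nodup)
    (hv : ∀ k ∈ l.map Prod.fst, Option.map Prod.snd (l.find? (fun p => p.1 == k)) = some (v k)) :
    l = (l.map Prod.fst).map (fun k => (k, v k)) := by
  induction l with
  | nil => rfl
  | cons p rest ih =>
    rw [List.map_cons] at hnd
    obtain ⟨hne, hnd2⟩ := List.nodup_cons.mp hnd
    have hp : p.2 = v p.1 := by
      have := hv p.1 (by simp)
      simpa [List.find?_cons] using this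
    have hrest : rest = (rest.map Prod.fst).map (fun k => (k, v k)) := by
      refine ih ?_ ?_
      · exact hnd2
      · intro k hk
        have hkp : (p.1 == k) = false := by
          have : p.1 ≠ k := fun he => hne (he ▸ hk)
          simpa using this
        have := hv k (by simp [hk])
        simpa [List.find?_cons, hkp] using this
    calc p :: rest = (p.1, v p.1) :: rest := by rw [← hp]
      _ = ((p.1 :: rest.map Prod.fst).map (fun k => (k, v k))) := by
          rw [List.map_cons, ← hrest]
      _ = (((p :: rest).map Prod.fst).map (fun k => (k, v k))) := by simp

lemma yearsOf_ne_nil (albums : List (String × String × Int)) (a : String)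
    (h : a ∈ albums.map (fun row => row.1)) : yearsOf albums a ≠ [] := by
  obtain ⟨row, hrow, hfst⟩ := List.mem_map.mp h
  have : row.2.2 ∈ yearsOf albums a := by
    simp only [yearsOf, List.mem_map, List.mem_filter]
    exact ⟨row, ⟨hrow, by simp [hfst]⟩, rfl⟩
  exact List.ne_nil_of_mem this

lemma get?_fold_mem (albums : List (String × String × Int)) (a : String)
    (h : a ∈ albums.map (fun row => row.1)) :
    (albums.foldl stepD PySem.Dict.empty).get? a = some (vOf albums a) := by
  rw [get?_fold]
  have hempty : (PySem.Dict.empty : PySem.Dict String (Int × Int)).get? a = none := rfl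
  rw [hempty]
  cases hys : yearsOf albums a with
  | nil => exact absurd hys (yearsOf_ne_nil albums a h)
  | cons y t =>
    have hc : comb none y = some (y, y) := rfl
    rw [List.foldl_cons, hc, foldl_comb_some]
    simp [vOf, hys]

lemma spanB_eq (albums : List (String × String × Int)) (a : String) :
    spanB albums a = (vOf albums a).2 - (vOf albums a).1 := by
  have hspan : spanB albums a
      = (match PySem.List.max? (yearsOf albums a) (fun y => y),
               PySem.List.min? (yearsOf albums a) (fun y => y) with
         | some M, some m => M - m
         | _, _ => 0) := rfl
  cases hys : yearsOf albums a with
  | nil => rw [hspan, hys]; simp [PySem.List.max?, PySem.List.min?, vOf, hys]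
  | cons y t =>
    rw [hspan, hys, PySem.List.max?_id_cons, PySem.List.min?_id_cons]
    simp [vOf, hys]

lemma max?_cons_sp (sp : String → Int) (t : List String) : ∀ (a : String),
    PySem.List.max? (a :: t) sp = some (t.foldl (fun m x => if sp m < sp x then x else m) a) := by
  induction t with
  | nil => intro a; rfl
  | cons x t ih =>
    intro a
    have h1 : PySem.List.max? (a :: x :: t) sp
        = PySem.List.max? ((if sp a < sp x then x else a) :: t) sp := by
      by_cases h : sp a < sp x <;> simp [PySem.List.max?, h]
    rw [h1, ih, List.foldl_cons]

lemma fold_argmax (sp : String → Int) (t : List String) : ∀ (a a0 : String) (v0 : Int),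
    t.foldl (fun acc x => if sp x > acc.2 then (x, sp x) else acc)
      (if sp a > v0 then (a, sp a) else (a0, v0))
    = (if sp (t.foldl (fun m x => if sp m < sp x then x else m) a) > v0
       then (t.foldl (fun m x => if sp m < sp x then x else m) a,
             sp (t.foldl (fun m x => if sp m < sp x then x else m) a))
       else (a0, v0)) := by
  induction t with
  | nil => intro a a0 v0; rfl
  | cons x t ih =>
    intro a a0 v0
    have hstep : (if sp x > (if sp a > v0 then (a, sp a) else (a0, v0)).2 then (x, sp x)
          else if sp a > v0 then (a, sp a) else (a0, v0))
        = (if sp (if sp a < sp x then x else a) > v0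
           then ((if sp a < sp x then x else a), sp (if sp a < sp x then x else a))
           else (a0, v0)) := by
      by_cases h1 : sp a > v0 <;> by_cases h2 : sp a < sp x <;>
        simp only [h1, h2, if_pos, if_neg, not_false_iff] <;>
        split_ifs <;> first | rfl | (exfalso; omega)
    rw [List.foldl_cons, hstep, ih, List.foldl_cons]

-- ===== VERDICT (by name: the statement is the Claim_ definition above) =====
theorem longest_career_spec : Claim_equal_longest_career := by
  intro albums _
  unfold Spec_longest_career
  have hA : longest_career albums
      = (albums.foldl stepD PySem.Dict.empty).items.foldl
          (fun acc kv => if kv.2.2 - kv.2.1 > acc.2 then (kv.1, kv.2.2 - kv.2.1) else acc)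
          ("", 0) := rfl
  have hB : longest_career_alt albums
      = (if PySem.List.dedup (albums.map (fun row => row.1)) = [] then (("", 0) : String × Int)
         else match PySem.List.max? (PySem.List.dedup (albums.map (fun row => row.1))) (spanB albums) with
           | some best => if spanB albums best > 0 then (best, spanB albums best) else ("", 0)
           | none => ("", 0)) := rfl
  have hkeys : (albums.foldl stepD PySem.Dict.empty).items.map Prod.fst
      = PySem.List.dedup (albums.map (fun row => row.1)) := by
    have := keys_fold albums
    simpa [PySem.Dict.keys] using this
  have hitems : (albums.foldl stepD PySem.Dict.empty).items
      = (PySem.List.dedup (albums.map (fun row => row.1))).map (fun k => (k, vOf albums k)) := by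
    have h1 := items_of_nodup (albums.foldl stepD PySem.Dict.empty).items (vOf albums)
      (by rw [hkeys]; exact PySem.List.nodup_dedup _)
      (by
        intro k hk
        have hmem : k ∈ albums.map (fun row => row.1) :=
          (PySem.List.mem_dedup _ _).mp (hkeys ▸ hk)
        have := get?_fold_mem albums k hmem
        simpa [PySem.Dict.get?] using this)
    rw [h1, hkeys]
  rw [hA, hitems, List.foldl_map, hB]
  simp only [← spanB_eq]
  cases hks : PySem.List.dedup (albums.map (fun row => row.1)) with
  | nil => simp
  | cons k t =>
    have hne : (k :: t : List String) ≠ [] := by simp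
    rw [if_neg hne, max?_cons_sp, List.foldl_cons]
    have hinit : (if spanB albums k > (("", 0) : String × Int).2 then (k, spanB albums k) else ("", 0))
        = (if spanB albums k > 0 then (k, spanB albums k) else (("", 0) : String × Int)) := rfl
    rw [hinit, fold_argmax (spanB albums) t k "" 0]
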